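-- pv_equiv track=rewrite | github.com/devwolfdev/RedTool | elkserver/scripts/modules/helpers.py | groupHits
-- ===== SOURCE A (Python) =====
-- def getValue(path, source):
--     p = path.split('.')
--     if p[0] in source:
--         if len(p) > 1:
--             return getValue('.'.join(p[1:]), source[p[0]])
--         else:
--             if p[0] == 'ip':
--                 return source[p[0]][0]
--             else:
--                 return source[p[0]]
--     else:
--         return None
--
-- def groupHits(hits, groupby, res=None):
--     if(len(groupby) > 0):
--         lHits = dict()
--         # First time in the loop
--         if res is None:
--             for h in hits:
--                 v = getValue('_source.%s' % groupby[0], h)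
--                 if v in lHits:
--                     lHits[v].append(h)
--                 else:
--                     lHits[v] = [h]
--         else:
--             for key, val in res.items():
--                 for h in val:
--                     v = getValue('_source.%s' % groupby[0], h)
--                     tmpKey = '%s / %s' % (key, v)
--                     if tmpKey in lHits:
--                         lHits[tmpKey].append(h)
--                     else:
--                         lHits[tmpKey] = [h]
--         groupby.pop(0)
--         return(groupHits(hits, groupby, lHits))
--     else:
--         if res is None:
--             return hits
--         else:
--             tmpHits = []
--             for k, v in res.items():
-- #                v[0]['_groupby'] = k
--                 tmpHits.append(v[0])
--             return tmpHits
-- ===== SOURCE B (Python) =====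
-- def getValue(path, source):
--     p = path.split('.')
--     if p[0] in source:
--         if len(p) > 1:
--             return getValue('.'.join(p[1:]), source[p[0]])
--         else:
--             if p[0] == 'ip':
--                 return source[p[0]][0]
--             else:
--                 return source[p[0]]
--     else:
--         return None
--
-- def _add(groups, k, h):
--     for pair in groups:
--         if pair[0] == k:
--             pair[1].append(h)
--             return
--     groups.append((k, [h]))
--
-- def groupHits(hits, groupby, res=None):
--     groups = None if res is None else list(res.items())
--     while groupby:
--         g = groupby.pop(0)
--         new = []
--         if groups is None:
--             for h in hits:
--                 _add(new, getValue('_source.%s' % g, h), h)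
--         else:
--             for key, val in groups:
--                 for h in val:
--                     _add(new, '%s / %s' % (key, getValue('_source.%s' % g, h)), h)
--         groups = new
--     if groups is None:
--         return hits
--     return [v[0] for _, v in groups]
-- ===== Notes on version B (the rewrite author's own statement) =====
-- stated objective: alternative
-- what changed: Grouping is done with plain association lists maintained by a linear-scan _add helper (scan for the key, append to its group, or append a fresh singleton pair) instead of A's dict with membership test plus two insertion branches, and A's tail recursion over groupby becomes a while loop; the final first-per-group extraction is a comprehension over the pair list.
import Mathlib
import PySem

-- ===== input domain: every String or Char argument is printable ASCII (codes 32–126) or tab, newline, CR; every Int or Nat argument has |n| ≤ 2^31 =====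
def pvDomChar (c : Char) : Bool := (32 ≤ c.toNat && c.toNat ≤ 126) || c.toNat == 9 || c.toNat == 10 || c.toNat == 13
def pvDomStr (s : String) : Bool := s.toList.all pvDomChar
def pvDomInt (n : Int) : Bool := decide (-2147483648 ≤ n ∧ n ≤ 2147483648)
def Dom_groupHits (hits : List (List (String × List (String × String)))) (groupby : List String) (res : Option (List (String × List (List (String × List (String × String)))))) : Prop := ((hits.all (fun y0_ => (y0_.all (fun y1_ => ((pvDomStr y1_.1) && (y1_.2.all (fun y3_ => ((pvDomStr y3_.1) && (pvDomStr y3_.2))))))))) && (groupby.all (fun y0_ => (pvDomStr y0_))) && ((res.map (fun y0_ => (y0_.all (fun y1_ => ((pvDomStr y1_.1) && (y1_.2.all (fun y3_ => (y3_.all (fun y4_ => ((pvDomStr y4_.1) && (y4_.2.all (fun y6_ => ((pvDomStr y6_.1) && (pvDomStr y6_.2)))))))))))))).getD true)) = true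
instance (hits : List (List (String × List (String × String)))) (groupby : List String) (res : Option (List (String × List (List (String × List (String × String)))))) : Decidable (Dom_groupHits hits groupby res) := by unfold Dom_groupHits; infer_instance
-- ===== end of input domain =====

-- B replaces A's dict-based grouping by association lists maintained with a linear-scan
-- append helper, and A's tail recursion over `groupby` by a single while-loop/fold
-- (objective: alternative — same cost, different data structure and decomposition).
-- Both Pythons mutate `groupby` in place (it is emptied); the equivalence proved here is
-- about the RETURN value only (B performs the same mutation as A).

-- ===== PORT A =====
-- Shared module helper `getValue` (used verbatim by both A and B, like in the Python module).
-- The hierarchy of types is fixed by the call `getValue('_source.%s' % g, hit)`, so the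
-- Python recursion is transcribed as one function per level of the structure.

-- `%s` formatting of a value that is either a string or Python None
def pvFmt : Option String → String
  | some s => s
  | none => "None"

-- getValue with `source` a plain string: `p[0] in source` is a substring test, and on a
-- match Python always raises TypeError (string indexed by a string) — excluded by Pre_;
-- otherwise the membership test fails and the function returns None.
def pvGetValueStr (_path : String) (_source : String) : Option String := none

-- getValue with `source : dict[str, str]` (the value of '_source')
def pvGetValueSrc (path : String) (source : List (String × String)) : Option String :=
  match (PySem.Str.split? path ".").getD [] with
  | [] => none   -- unreachable: split never returns an empty list
  | f :: rest =>
    if (PySem.Dict.mk source).contains f then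
      if rest ≠ [] then
        pvGetValueStr (PySem.Str.join "." rest) ((PySem.Dict.mk source).getD f "")
      else if f = "ip" then
        -- source['ip'][0] : IndexError on the empty string — excluded by Pre_
        match PySem.Str.pyGet? ((PySem.Dict.mk source).getD f "") 0 with
        | some c => some (String.ofList [c])
        | none => none
      else some ((PySem.Dict.mk source).getD f "")
    else none

-- getValue with `source` a hit (dict[str, dict[str, str]]); the path passed in always has
-- '_source' prepended, so `len(p) > 1` holds and the single-component branch is unreachable.
def pvGetValueHit (path : String) (h : List (String × List (String × String))) : Option String :=
  match (PySem.Str.split? path ".").getD [] with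
  | [] => none   -- unreachable
  | f :: rest =>
    if (PySem.Dict.mk h).contains f then
      if rest ≠ [] then
        pvGetValueSrc (PySem.Str.join "." rest) ((PySem.Dict.mk h).getD f [])
      else none  -- unreachable for the paths groupHits builds
    else none

-- The recursion's accumulator dict: its keys are getValue results (level 1: Optional[str],
-- possibly None) or formatted strings (deeper levels, injected as `some`); a caller-supplied
-- `res` (string keys) is injected the same way.
def pvInitResA (res : Option (List (String × List (List (String × List (String × String)))))) :
    Option (PySem.Dict (Option String) (List (List (String × List (String × String))))) :=
  res.map (fun l => PySem.Dict.mk (l.map (fun kv => (some kv.1, kv.2))))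

-- A's recursion, one step per `groupby.pop(0)`
def pvGroupLoopA (hits : List (List (String × List (String × String)))) :
    List String → Option (PySem.Dict (Option String) (List (List (String × List (String × String))))) →
    List (List (String × List (String × String)))
  | g :: gs, res =>
    let lHits : PySem.Dict (Option String) (List (List (String × List (String × String)))) :=
      match res with
      | none =>
        hits.foldl (fun l h =>
          let v := pvGetValueHit ("_source." ++ g) h
          if l.contains v then l.insert v (l.getD v [] ++ [h]) else l.insert v [h])
          (PySem.Dict.mk [])
      | some r =>
        r.items.foldl (fun l kv =>
          kv.2.foldl (fun l h =>
            let v := pvGetValueHit ("_source." ++ g) h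
            let tmpKey : Option String := some (pvFmt kv.1 ++ " / " ++ pvFmt v)
            if l.contains tmpKey then l.insert tmpKey (l.getD tmpKey [] ++ [h])
            else l.insert tmpKey [h]) l)
          (PySem.Dict.mk [])
    pvGroupLoopA hits gs (some lHits)
  | [], res =>
    match res with
    | none => hits
    | some r =>
      -- `v[0]`: inside Pre_ every group list is non-empty, so the default is never used
      r.items.foldl (fun acc kv => acc ++ [kv.2.headD []]) []

def groupHits (hits : List (List (String × List (String × String)))) (groupby : List String) (res : Option (List (String × List (List (String × List (String × String)))))) : List (List (String × List (String × String))) :=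
  pvGroupLoopA hits groupby (pvInitResA res)

-- ===== PORT B =====
-- `_add(groups, k, h)`: scan the association list for key k; append h to its group,
-- or append a fresh singleton group at the end.
def pvAdd {κ β : Type} [BEq κ] : List (κ × List β) → κ → β → List (κ × List β)
  | [], k, h => [(k, [h])]
  | (k', v) :: rest, k, h =>
    if k' == k then (k', v ++ [h]) :: rest else (k', v) :: pvAdd rest k h

-- one iteration of B's while loop: rebuild the association list `new` with _add
def pvStepB (hits : List (List (String × List (String × String)))) (g : String) :
    Option (List ((Option String) × List (List (String × List (String × String))))) →
    List ((Option String) × List (List (String × List (String × String))))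
  | none =>
    hits.foldl (fun G h => pvAdd G (pvGetValueHit ("_source." ++ g) h) h) []
  | some gs =>
    gs.foldl (fun G kv =>
      kv.2.foldl (fun G h =>
        pvAdd G (some (pvFmt kv.1 ++ " / " ++ pvFmt (pvGetValueHit ("_source." ++ g) h))) h) G) []

def groupHits_alt (hits : List (List (String × List (String × String)))) (groupby : List String) (res : Option (List (String × List (List (String × List (String × String)))))) : List (List (String × List (String × String))) :=
  match groupby.foldl (fun groups g => some (pvStepB hits g groups))
      (res.map (fun l => l.map (fun kv => (some kv.1, kv.2)))) with
  | none => hits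
  | some gs => gs.map (fun kv => kv.2.headD [])

-- ===== PRECONDITION & SPEC =====
-- Pre_ excludes exactly the inputs where the Python raises: a caller-supplied `res` with an
-- empty group list when `groupby` is empty (IndexError on v[0]); and, when grouping, any hit
-- whose '_source' makes getValue('_source.'+g, hit) raise — g == 'ip' with _source['ip'] == ''
-- (IndexError), or a dotted g whose second component is a substring of the string field named
-- by its first component (TypeError: string indexed by a string).
def pvUnsafeField (g : String) (h : List (String × List (String × String))) : Bool :=
  match (PySem.Dict.mk h).get? "_source" with
  | none => false
  | some src =>
    match (PySem.Str.split? g ".").getD [] with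
    | [f] => f == "ip" && (PySem.Dict.mk src).get? "ip" == some ""
    | f1 :: f2 :: _ =>
      (PySem.Dict.mk src).contains f1 && PySem.Str.isIn f2 ((PySem.Dict.mk src).getD f1 "")
    | [] => false

def Pre_groupHits (hits : List (List (String × List (String × String)))) (groupby : List String) (res : Option (List (String × List (List (String × List (String × String)))))) : Prop :=
  if groupby = [] then
    ∀ kv ∈ res.getD [], kv.2 ≠ []
  else
    ∀ g ∈ groupby, ∀ h ∈ (res.map (fun d => (d.map Prod.snd).flatten)).getD hits,
      pvUnsafeField g h = false
instance (hits : List (List (String × List (String × String)))) (groupby : List String) (res : Option (List (String × List (List (String × List (String × String)))))) : Decidable (Pre_groupHits hits groupby res) := by unfold Pre_groupHits; infer_instance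

def pvWitness_groupHits : (List (List (String × List (String × String)))) × List String × (Option (List (String × List (List (String × List (String × String)))))) :=
  ([[("_source", [("k", "v")])], [("_source", [("k", "w")])]], ["k"], none)

def Spec_groupHits (hits : List (List (String × List (String × String)))) (groupby : List String) (res : Option (List (String × List (List (String × List (String × String)))))) (out : List (List (String × List (String × String)))) : Prop := out = groupHits_alt hits groupby res
instance (hits : List (List (String × List (String × String)))) (groupby : List String) (res : Option (List (String × List (List (String × List (String × String)))))) (out : List (List (String × List (String × String)))) : Decidable (Spec_groupHits hits groupby res out) := by unfold Spec_groupHits; infer_instance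

-- ===== CLAIM (what is proved, stated in full; the proofs are below) =====
def Claim_equal_groupHits : Prop := ∀ (hits : List (List (String × List (String × String)))) (groupby : List String) (res : Option (List (String × List (List (String × List (String × String)))))), Dom_groupHits hits groupby res → Pre_groupHits hits groupby res → Spec_groupHits hits groupby res (groupHits hits groupby res)

-- ===== LEMMAS AND PROOFS =====

-- A's membership-test-then-append/insert grouping update IS d[k] = d.get(k, []) + [h]
theorem pv_upd_eq {κ : Type} [BEq κ] (l : PySem.Dict κ (List (List (String × List (String × String)))))
    (k : κ) (h : List (String × List (String × String))) :
    (if l.contains k then l.insert k (l.getD k [] ++ [h]) else l.insert k [h]) =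
      l.modify k [] (· ++ [h]) := by
  by_cases hc : l.contains k
  · simp [PySem.Dict.modify, hc]
  · simp [PySem.Dict.modify, hc,
      PySem.Dict.getD_of_not_contains l ([] : List (List (String × List (String × String)))) (by simpa using hc)]

-- a single dict modify, seen on the items list, is B's association-list _add
theorem pv_items_modify_eq_pvAdd {κ β : Type} [BEq κ] [LawfulBEq κ]
    (L : List (κ × List β)) (k : κ) (h : β) (hnd : (L.map Prod.fst).Nodup) :
    ((PySem.Dict.mk L).modify k [] (· ++ [h])).items = pvAdd L k h := by
  induction L with
  | nil =>
    simp [PySem.Dict.modify, PySem.Dict.insert, PySem.Dict.contains, PySem.Dict.getD,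
      PySem.Dict.get?, pvAdd]
  | cons p rest ih =>
    obtain ⟨k', v⟩ := p
    simp only [List.map_cons, List.nodup_cons] at hnd
    by_cases hk : k' = k
    · subst hk
      have hrest : ∀ q ∈ rest, (q.1 == k') = false := by
        intro q hq
        simp only [beq_eq_false_iff_ne, ne_eq]
        intro hqe; exact hnd.1 (hqe ▸ List.mem_map_of_mem hq)
      have hcont : (PySem.Dict.mk ((k', v) :: rest)).contains k' = true := by
        simp [PySem.Dict.contains]
      have hgetD : (PySem.Dict.mk ((k', v) :: rest)).getD k' [] = v := by
        simp [PySem.Dict.getD, PySem.Dict.get?]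
      rw [PySem.Dict.modify, hgetD, PySem.Dict.insert, if_pos hcont]
      simp only [pvAdd, List.map_cons, beq_self_eq_true, if_true]
      refine List.cons_eq_cons.mpr ⟨rfl, ?_⟩
      rw [List.map_congr_left (g := id) (fun q hq => by simp [hrest q hq]), List.map_id]
    · have hbk : (k' == k) = false := by simp [hk]
      have hget : (PySem.Dict.mk ((k', v) :: rest)).getD k [] = (PySem.Dict.mk rest).getD k [] := by
        simp [PySem.Dict.getD, PySem.Dict.get?, hbk]
      have tail := ih hnd.2
      rw [PySem.Dict.modify] at tail ⊢
      rw [hget, PySem.Dict.insert] at ⊢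
      rw [PySem.Dict.insert] at tail
      simp only [PySem.Dict.contains, List.any_cons, hbk, Bool.false_or] at tail ⊢
      by_cases hc : rest.any (fun p => p.1 == k)
      · simp only [hc, if_true] at tail ⊢
        simpa [pvAdd, hbk] using tail
      · simp only [hc, Bool.false_eq_true, if_false] at tail ⊢
        simpa [pvAdd, hbk] using tail

-- _add's effect on the key list: an existing key leaves it unchanged, a fresh key appends
theorem pv_keys_pvAdd {κ β : Type} [BEq κ] (L : List (κ × List β)) (k : κ) (h : β) :
    (pvAdd L k h).map Prod.fst =
      if L.any (fun p => p.1 == k) then L.map Prod.fst else L.map Prod.fst ++ [k] := by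
  induction L with
  | nil => simp [pvAdd]
  | cons p rest ih =>
    obtain ⟨k', v⟩ := p
    by_cases hq : (k' == k) = true
    · simp [pvAdd, hq]
    · have hq' : (k' == k) = false := by simpa using hq
      simp only [pvAdd, hq', Bool.false_eq_true, if_false, List.map_cons,
        List.any_cons, Bool.false_or, ih]
      split <;> simp

-- _add never breaks key uniqueness
theorem pv_nodup_pvAdd {κ β : Type} [BEq κ] [LawfulBEq κ]
    (L : List (κ × List β)) (k : κ) (h : β) (hnd : (L.map Prod.fst).Nodup) :
    ((pvAdd L k h).map Prod.fst).Nodup := by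
  rw [pv_keys_pvAdd]
  split
  · exact hnd
  · next hna =>
    refine List.Nodup.append hnd (List.nodup_singleton k) ?_
    intro j hj hj'
    rcases List.mem_map.mp hj with ⟨q, hq, hqe⟩
    rcases List.mem_singleton.mp hj' with rfl
    exact absurd (List.any_eq_true.mpr ⟨q, hq, by simp [hqe]⟩) hna

-- a whole modify-loop, seen on the items list, is B's _add-loop (any element list, any
-- per-element key; covers both branches of one grouping pass)
theorem pv_foldl_modify_eq_foldl_pvAdd {α κ : Type} [BEq κ] [LawfulBEq κ]
    (xs : List α) (kf : α → κ) (vf : α → List (String × List (String × String)))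
    (d : PySem.Dict κ (List (List (String × List (String × String)))))
    (hnd : (d.items.map Prod.fst).Nodup) :
    (xs.foldl (fun l x => l.modify (kf x) [] (· ++ [vf x])) d).items
        = xs.foldl (fun G x => pvAdd G (kf x) (vf x)) d.items ∧
      ((xs.foldl (fun G x => pvAdd G (kf x) (vf x)) d.items).map Prod.fst).Nodup := by
  induction xs generalizing d with
  | nil => exact ⟨rfl, hnd⟩
  | cons x xs ih =>
    have hstep : (d.modify (kf x) [] (· ++ [vf x])).items = pvAdd d.items (kf x) (vf x) :=
      pv_items_modify_eq_pvAdd d.items (kf x) (vf x) hnd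
    have hnd' : ((pvAdd d.items (kf x) (vf x)).map Prod.fst).Nodup :=
      pv_nodup_pvAdd d.items (kf x) (vf x) hnd
    have := ih (d.modify (kf x) [] (· ++ [vf x])) (by rw [hstep]; exact hnd')
    simpa [List.foldl_cons, hstep] using this

-- the nested loop over a previous level's groups, items-wise, is B's nested _add-loop
theorem pv_nested_modify_eq_pvAdd {κ : Type} [BEq κ] [LawfulBEq κ]
    (pairs : List ((Option String) × List (List (String × List (String × String)))))
    (kf : Option String → List (String × List (String × String)) → κ)
    (d : PySem.Dict κ (List (List (String × List (String × String)))))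
    (hnd : (d.items.map Prod.fst).Nodup) :
    (pairs.foldl (fun l kv =>
        kv.2.foldl (fun l h => l.modify (kf kv.1 h) [] (· ++ [h])) l) d).items
      = pairs.foldl (fun G kv =>
          kv.2.foldl (fun G h => pvAdd G (kf kv.1 h) h) G) d.items := by
  induction pairs generalizing d with
  | nil => rfl
  | cons kv pairs ih =>
    obtain ⟨hstep, hnd'⟩ :=
      pv_foldl_modify_eq_foldl_pvAdd kv.2 (kf kv.1) (fun h => h) d hnd
    have := ih (kv.2.foldl (fun l h => l.modify (kf kv.1 h) [] (· ++ [h])) d)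
      (by rw [hstep]; exact hnd')
    simpa [List.foldl_cons, hstep] using this

-- one grouping pass of A (first-time branch), items-wise, is one pass of B
theorem pv_stepA_none_items (hits : List (List (String × List (String × String)))) (g : String) :
    (hits.foldl (fun l h =>
        let v := pvGetValueHit ("_source." ++ g) h
        if l.contains v then l.insert v (l.getD v [] ++ [h]) else l.insert v [h])
      (PySem.Dict.mk ([] : List ((Option String) × List (List (String × List (String × String))))))).items
    = pvStepB hits g none := by
  simp only [pvStepB, pv_upd_eq]
  exact (pv_foldl_modify_eq_foldl_pvAdd hits
    (fun h => pvGetValueHit ("_source." ++ g) h) (fun h => h)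
    (PySem.Dict.mk []) (by simp)).1

-- one grouping pass of A (regrouping branch), items-wise, is one pass of B
theorem pv_stepA_some_items (hits : List (List (String × List (String × String)))) (g : String)
    (r : PySem.Dict (Option String) (List (List (String × List (String × String))))) :
    (r.items.foldl (fun l kv =>
        kv.2.foldl (fun l h =>
          let v := pvGetValueHit ("_source." ++ g) h
          let tmpKey : Option String := some (pvFmt kv.1 ++ " / " ++ pvFmt v)
          if l.contains tmpKey then l.insert tmpKey (l.getD tmpKey [] ++ [h])
          else l.insert tmpKey [h]) l)
      (PySem.Dict.mk ([] : List ((Option String) × List (List (String × List (String × String))))))).items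
    = pvStepB hits g (some r.items) := by
  simp only [pvStepB, pv_upd_eq]
  exact pv_nested_modify_eq_pvAdd r.items
    (fun k h => some (pvFmt k ++ " / " ++ pvFmt (pvGetValueHit ("_source." ++ g) h)))
    (PySem.Dict.mk []) (by simp)

-- A's recursion equals B's fold over groupby followed by B's finalization
theorem pv_loop_eq (hits : List (List (String × List (String × String)))) (gs : List String)
    (res : Option (PySem.Dict (Option String) (List (List (String × List (String × String)))))) :
    pvGroupLoopA hits gs res =
      (match gs.foldl (fun groups g => some (pvStepB hits g groups))
          (res.map PySem.Dict.items) with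
        | none => hits
        | some G => G.map (fun kv => kv.2.headD [])) := by
  induction gs generalizing res with
  | nil =>
    cases res with
    | none => rfl
    | some r =>
      simp only [pvGroupLoopA, Option.map_some, List.foldl_nil]
      simpa using PySem.List.foldl_append_singleton_eq_map
        (fun kv : (Option String) × List (List (String × List (String × String))) => kv.2.headD [])
        r.items []
  | cons g gs ih =>
    cases res with
    | none =>
      simp only [pvGroupLoopA, List.foldl_cons, Option.map_none]
      rw [ih, ← pv_stepA_none_items hits g]
      rfl
    | some r =>
      simp only [pvGroupLoopA, List.foldl_cons, Option.map_some]
      rw [ih, ← pv_stepA_some_items hits g r]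
      rfl

-- ===== VERDICT (by name: the statement is the Claim_ definition above) =====
theorem groupHits_spec : Claim_equal_groupHits := by
  intro hits groupby res _ _
  unfold Spec_groupHits groupHits groupHits_alt
  rw [pv_loop_eq hits groupby (pvInitResA res)]
  cases res <;> rfl
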